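-- pv_equiv track=rewrite | github.com/RiSEblackbird/wordpack-for-english | src/backend/pronunciation.py | _phones_to_ipa
-- ===== SOURCE A (Python) =====
-- from typing import List, Tuple
--
-- _ARPABET_TO_IPA = {
--     # Vowels
--     "AA": "ɑ",
--     "AE": "æ",
--     "AH": "ʌ",
--     "AO": "ɔ",
--     "AW": "aʊ",
--     "AY": "aɪ",
--     "EH": "ɛ",
--     "ER": "ɝ",
--     "EY": "eɪ",
--     "IH": "ɪ",
--     "IY": "i",
--     "OW": "oʊ",
--     "OY": "ɔɪ",
--     "UH": "ʊ",
--     "UW": "u",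
--     # Consonants
--     "B": "b",
--     "CH": "tʃ",
--     "D": "d",
--     "DH": "ð",
--     "F": "f",
--     "G": "ɡ",
--     "HH": "h",
--     "JH": "dʒ",
--     "K": "k",
--     "L": "l",
--     "M": "m",
--     "N": "n",
--     "NG": "ŋ",
--     "P": "p",
--     "R": "ɹ",
--     "S": "s",
--     "SH": "ʃ",
--     "T": "t",
--     "TH": "θ",
--     "V": "v",
--     "W": "w",
--     "Y": "j",
--     "Z": "z",
--     "ZH": "ʒ",
-- }
--
-- _VOWELS = {
--     "AA",
--     "AE",
--     "AH",
--     "AO",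
--     "AW",
--     "AY",
--     "EH",
--     "ER",
--     "EY",
--     "IH",
--     "IY",
--     "OW",
--     "OY",
--     "UH",
--     "UW",
-- }
--
-- def _strip_stress(phone: str) -> Tuple[str, int | None]:
--     """Return base ARPABET phone and stress (0/1/2) if present."""
--     if not phone:
--         return phone, None
--     if phone[-1].isdigit():
--         return phone[:-1], int(phone[-1])
--     return phone, None
--
-- def _phones_to_ipa(phones: List[str]) -> Tuple[str, int, int | None]:
--     """Convert ARPABET phones to IPA string, return (ipa, syllables, primary_stress_index)."""
--     ipa_parts: List[str] = []
--     syllable_count = 0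
--     syllable_index = -1
--     primary_stress_index: int | None = None
--
--     for phone in phones:
--         base, stress = _strip_stress(phone)
--         # syllable detection on vowels
--         if base in _VOWELS:
--             syllable_index += 1
--             syllable_count += 1
--             if stress == 1 and primary_stress_index is None:
--                 primary_stress_index = syllable_index
--         ipa = _ARPABET_TO_IPA.get(base, base.lower())
--         ipa_parts.append(ipa)
--
--     # fallback when no vowel detected
--     if syllable_count == 0:
--         syllable_count = 1
--         primary_stress_index = 0 if primary_stress_index is None else primary_stress_index
--
--     return " ".join(ipa_parts), syllable_count, primary_stress_index
-- ===== SOURCE B (Python) =====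
-- from typing import List, Optional, Tuple
--
-- # Only the ARPABET phones whose IPA is NOT simply the lowercased symbol;
-- # everything else (B, D, F, K, L, M, N, P, S, T, V, W, Z, unknown phones) falls
-- # through to base.lower().
-- _IPA_SPECIAL = {
--     "AA": "ɑ", "AE": "æ", "AH": "ʌ", "AO": "ɔ", "AW": "aʊ", "AY": "aɪ",
--     "EH": "ɛ", "ER": "ɝ", "EY": "eɪ", "IH": "ɪ", "IY": "i", "OW": "oʊ",
--     "OY": "ɔɪ", "UH": "ʊ", "UW": "u",
--     "CH": "tʃ", "DH": "ð", "G": "ɡ", "HH": "h", "JH": "dʒ",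
--     "NG": "ŋ", "R": "ɹ", "SH": "ʃ", "TH": "θ", "Y": "j", "ZH": "ʒ",
-- }
--
-- _VOWELS = ("AA", "AE", "AH", "AO", "AW", "AY", "EH", "ER", "EY", "IH", "IY",
--            "OW", "OY", "UH", "UW")
--
--
-- def _phone_info(phone: str) -> Tuple[str, bool, Optional[int]]:
--     """(ipa, is_vowel, stress) for one ARPABET phone."""
--     base, stress = phone, None
--     if phone and phone[-1].isdigit():
--         base, stress = phone[:-1], ord(phone[-1]) - 48
--     ipa = _IPA_SPECIAL.get(base)
--     if ipa is None:
--         ipa = base.lower()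
--     return ipa, base in _VOWELS, stress
--
--
-- def _phones_to_ipa(phones: List[str]) -> Tuple[str, int, Optional[int]]:
--     """Convert ARPABET phones to IPA string, return (ipa, syllables, primary_stress_index)."""
--     infos = [_phone_info(p) for p in phones]
--     ipa = " ".join(t[0] for t in infos)
--     stresses = [t[2] for t in infos if t[1]]
--     if not stresses:
--         return ipa, 1, 0
--     if 1 in stresses:
--         return ipa, len(stresses), stresses.index(1)
--     return ipa, len(stresses), None
-- ===== Notes on version B (the rewrite author's own statement) =====
-- stated objective: alternative
-- what changed: Replaces A's single stateful loop (running syllable_index, incremental primary-stress tracking, full 39-entry IPA dict, post-loop fallback patching) by a per-phone helper producing (ipa, is_vowel, stress) triples over a reduced special-case dict with a lowercase default, followed by separate passes: join, vowel-stress sublist, len, and list.index of the first primary stress.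
import Mathlib
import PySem

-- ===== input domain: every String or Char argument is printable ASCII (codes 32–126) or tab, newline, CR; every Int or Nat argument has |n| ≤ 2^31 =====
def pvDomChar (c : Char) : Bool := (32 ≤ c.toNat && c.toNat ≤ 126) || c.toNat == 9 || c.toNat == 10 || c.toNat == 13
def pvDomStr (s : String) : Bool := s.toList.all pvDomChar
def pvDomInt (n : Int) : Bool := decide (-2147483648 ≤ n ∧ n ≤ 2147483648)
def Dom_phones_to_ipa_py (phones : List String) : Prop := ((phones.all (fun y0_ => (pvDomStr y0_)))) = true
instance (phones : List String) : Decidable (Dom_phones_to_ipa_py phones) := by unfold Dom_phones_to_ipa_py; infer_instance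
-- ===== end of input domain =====

-- B replaces A's single stateful loop (running syllable_index, incremental primary-stress
-- tracking, full IPA dict, post-loop fallback patching) by a per-phone (ipa, is_vowel, stress)
-- helper over a reduced special-case dict with a lowercase default, then separate passes:
-- join, vowel-stress sublist, len, first index of stress 1 (objective: alternative; same O(n)).

-- ===== PORT A =====
def pvArpabetToIpa : PySem.Dict String String := PySem.Dict.ofList [
  ("AA", "ɑ"), ("AE", "æ"), ("AH", "ʌ"), ("AO", "ɔ"), ("AW", "aʊ"), ("AY", "aɪ"), ("EH", "ɛ"), ("ER", "ɝ"), ("EY", "eɪ"), ("IH", "ɪ"), ("IY", "i"), ("OW", "oʊ"), ("OY", "ɔɪ"), ("UH", "ʊ"), ("UW", "u"), ("B", "b"), ("CH", "tʃ"), ("D", "d"), ("DH", "ð"), ("F", "f"), ("G", "ɡ"), ("HH", "h"), ("JH", "dʒ"), ("K", "k"), ("L", "l"), ("M", "m"), ("N", "n"), ("NG", "ŋ"), ("P", "p"), ("R", "ɹ"), ("S", "s"), ("SH", "ʃ"), ("T", "t"), ("TH", "θ"), ("V", "v"), ("W", "w"), ("Y", "j"), ("Z", "z"), ("ZH", "ʒ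")]

def pvVowels : PySem.Set String := PySem.Set.ofList ["AA", "AE", "AH", "AO", "AW", "AY", "EH", "ER", "EY", "IH", "IY", "OW", "OY", "UH", "UW"]

-- _strip_stress, step for step; the digit guard guarantees int(phone[-1]) = ofChars? is 'some'
def pvStripStress (phone : String) : String × Option Int :=
  if phone = "" then (phone, none)
  else
    let cs := phone.toList
    let last := PySem.List.pyGetD cs (-1) ' '
    if PySem.Chars.isdigit last then
      (String.ofList (PySem.List.slice cs none (some (-1))), PySem.Int.ofChars? [last])
    else (phone, none)

-- the ipa value appended for one phone:  _ARPABET_TO_IPA.get(base, base.lower())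
def pvIpaOf (base : String) : String := pvArpabetToIpa.getD base (PySem.Str.lower base)

-- the loop body of A: state = (ipa_parts, syllable_count, syllable_index, primary_stress_index)
def pvStepA (acc : List String × Int × Int × Option Int) (phone : String) :
    List String × Int × Int × Option Int :=
  let bs := pvStripStress phone
  let t :=
    if PySem.Set.contains pvVowels bs.1 then
      (acc.2.1 + 1, acc.2.2.1 + 1,
        if bs.2 = some 1 ∧ acc.2.2.2 = none then some (acc.2.2.1 + 1) else acc.2.2.2)
    else acc.2
  (acc.1 ++ [pvIpaOf bs.1], t)

def phones_to_ipa_py (phones : List String) : String × Int × Option Int :=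
  let st := phones.foldl pvStepA ([], 0, -1, none)
  let sylCount := if st.2.1 = 0 then 1 else st.2.1
  let primary := if st.2.1 = 0 then (if st.2.2.2 = none then some 0 else st.2.2.2) else st.2.2.2
  (PySem.Str.join " " st.1, sylCount, primary)

-- ===== PORT B =====
-- only the phones whose IPA is not the lowercased symbol; the rest default to lower()
def pvIpaSpecial : PySem.Dict String String := PySem.Dict.ofList [
  ("AA", "ɑ"), ("AE", "æ"), ("AH", "ʌ"), ("AO", "ɔ"), ("AW", "aʊ"), ("AY", "aɪ"), ("EH", "ɛ"), ("ER", "ɝ"), ("EY", "eɪ"), ("IH", "ɪ"), ("IY", "i"), ("OW", "oʊ"), ("OY", "ɔɪ"), ("UH", "ʊ"), ("UW", "u"), ("CH", "tʃ"), ("DH", "ð"), ("G", "ɡ"), ("HH", "h"), ("JH", "dʒ"), ("NG", "ŋ"), ("R", "ɹ"), ("SH", "ʃ"), ("TH", "θ"), ("Y", "j"), ("ZH", "ʒ")]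

def pvVowelTuple : List String := ["AA", "AE", "AH", "AO", "AW", "AY", "EH", "ER", "EY", "IH", "IY", "OW", "OY", "UH", "UW"]

-- _IPA_SPECIAL.get(base) with the 'if ipa is None: ipa = base.lower()' default
def pvIpaLookup (base : String) : String :=
  match pvIpaSpecial.get? base with
  | some v => v
  | none => PySem.Str.lower base

-- _phone_info: (ipa, is_vowel, stress) for one phone ('ord(phone[-1]) - 48' is exact for
-- an ASCII digit last character)
def pvPhoneInfo (phone : String) : String × Bool × Option Int :=
  let cs := phone.toList
  let bs : String × Option Int :=
    match cs.getLast? with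
    | some c =>
        if PySem.Chars.isdigit c then
          (String.ofList cs.dropLast, some ((c.toNat : Int) - 48))
        else (phone, none)
    | none => (phone, none)
  (pvIpaLookup bs.1, pvVowelTuple.contains bs.1, bs.2)

def phones_to_ipa_py_alt (phones : List String) : String × Int × Option Int :=
  let infos := phones.map pvPhoneInfo
  let ipa := PySem.Str.join " " (infos.map (·.1))
  let stresses := (infos.filter (·.2.1)).map (·.2.2)
  if stresses = [] then (ipa, 1, some 0)
  else if stresses.contains (some 1) then
    (ipa, (stresses.length : Int), (PySem.List.index? stresses (some 1)).map (fun k => (k : Int)))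
  else (ipa, (stresses.length : Int), none)

-- ===== PRECONDITION & SPEC =====
def Spec_phones_to_ipa_py (phones : List String) (out : String × Int × Option Int) : Prop := out = phones_to_ipa_py_alt phones
instance (phones : List String) (out : String × Int × Option Int) : Decidable (Spec_phones_to_ipa_py phones out) := by unfold Spec_phones_to_ipa_py; infer_instance

-- ===== CLAIM (what is proved, stated in full; the proofs are below) =====
def Claim_equal_phones_to_ipa_py : Prop := ∀ (phones : List String), Dom_phones_to_ipa_py phones → Spec_phones_to_ipa_py phones (phones_to_ipa_py phones)

-- ===== LEMMAS AND PROOFS =====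

-- B's reduced special-case dict with a lowercase default computes A's full-dict lookup
set_option maxRecDepth 8192 in
theorem pvTableEq (b : String) : pvIpaLookup b = pvIpaOf b := by
  unfold pvIpaLookup pvIpaOf
  by_cases e1 : b = "AA"
  · subst e1; decide
  by_cases e2 : b = "AE"
  · subst e2; decide
  by_cases e3 : b = "AH"
  · subst e3; decide
  by_cases e4 : b = "AO"
  · subst e4; decide
  by_cases e5 : b = "AW"
  · subst e5; decide
  by_cases e6 : b = "AY"
  · subst e6; decide
  by_cases e7 : b = "EH"
  · subst e7; decide
  by_cases e8 : b = "ER"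
  · subst e8; decide
  by_cases e9 : b = "EY"
  · subst e9; decide
  by_cases e10 : b = "IH"
  · subst e10; decide
  by_cases e11 : b = "IY"
  · subst e11; decide
  by_cases e12 : b = "OW"
  · subst e12; decide
  by_cases e13 : b = "OY"
  · subst e13; decide
  by_cases e14 : b = "UH"
  · subst e14; decide
  by_cases e15 : b = "UW"
  · subst e15; decide
  by_cases e16 : b = "B"
  · subst e16; decide
  by_cases e17 : b = "CH"
  · subst e17; decide
  by_cases e18 : b = "D"
  · subst e18; decide
  by_cases e19 : b = "DH"
  · subst e19; decide
  by_cases e20 : b = "F"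
  · subst e20; decide
  by_cases e21 : b = "G"
  · subst e21; decide
  by_cases e22 : b = "HH"
  · subst e22; decide
  by_cases e23 : b = "JH"
  · subst e23; decide
  by_cases e24 : b = "K"
  · subst e24; decide
  by_cases e25 : b = "L"
  · subst e25; decide
  by_cases e26 : b = "M"
  · subst e26; decide
  by_cases e27 : b = "N"
  · subst e27; decide
  by_cases e28 : b = "NG"
  · subst e28; decide
  by_cases e29 : b = "P"
  · subst e29; decide
  by_cases e30 : b = "R"
  · subst e30; decide
  by_cases e31 : b = "S"
  · subst e31; decide
  by_cases e32 : b = "SH"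
  · subst e32; decide
  by_cases e33 : b = "T"
  · subst e33; decide
  by_cases e34 : b = "TH"
  · subst e34; decide
  by_cases e35 : b = "V"
  · subst e35; decide
  by_cases e36 : b = "W"
  · subst e36; decide
  by_cases e37 : b = "Y"
  · subst e37; decide
  by_cases e38 : b = "Z"
  · subst e38; decide
  by_cases e39 : b = "ZH"
  · subst e39; decide
  have hIF : pvArpabetToIpa.items = [("AA", "ɑ"), ("AE", "æ"), ("AH", "ʌ"), ("AO", "ɔ"), ("AW", "aʊ"), ("AY", "aɪ"), ("EH", "ɛ"), ("ER", "ɝ"), ("EY", "eɪ"), ("IH", "ɪ"), ("IY", "i"), ("OW", "oʊ"), ("OY", "ɔɪ"), ("UH", "ʊ"), ("UW", "u"), ("B", "b"), ("CH", "tʃ"), ("D", "d"), ("DH", "ð"), ("F", "f"), ("G", "ɡ"), ("HH", "h"), ("JH", "dʒ"), ("K", "k"), ("L", "l"), ("M", "m"), ("N", "n"), ("NG", "ŋ"), ("P", "p"), ("R", "ɹ"), ("S", "s"), ("SH", "ʃ"), ("T", "t"), ("TH", "θ"), ("V", "v"), ("W", "w"), ("Y", "j"), ("Z", "z"), ("ZH",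 "ʒ")] := by decide
  have hIS : pvIpaSpecial.items = [("AA", "ɑ"), ("AE", "æ"), ("AH", "ʌ"), ("AO", "ɔ"), ("AW", "aʊ"), ("AY", "aɪ"), ("EH", "ɛ"), ("ER", "ɝ"), ("EY", "eɪ"), ("IH", "ɪ"), ("IY", "i"), ("OW", "oʊ"), ("OY", "ɔɪ"), ("UH", "ʊ"), ("UW", "u"), ("CH", "tʃ"), ("DH", "ð"), ("G", "ɡ"), ("HH", "h"), ("JH", "dʒ"), ("NG", "ŋ"), ("R", "ɹ"), ("SH", "ʃ"), ("TH", "θ"), ("Y", "j"), ("ZH", "ʒ")] := by decide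
  have hF : pvArpabetToIpa.get? b = none := by
    simp [PySem.Dict.get?, hIF, List.find?_eq_none, Ne.symm e1, Ne.symm e2, Ne.symm e3, Ne.symm e4, Ne.symm e5, Ne.symm e6, Ne.symm e7, Ne.symm e8, Ne.symm e9, Ne.symm e10, Ne.symm e11, Ne.symm e12, Ne.symm e13, Ne.symm e14, Ne.symm e15, Ne.symm e16, Ne.symm e17, Ne.symm e18, Ne.symm e19, Ne.symm e20, Ne.symm e21, Ne.symm e22, Ne.symm e23, Ne.symm e24, Ne.symm e25, Ne.symm e26, Ne.symm e27, Ne.symm e28, Ne.symm e29, Ne.symm e30, Ne.symm e31, Ne.symm e32, Ne.symm e33, Ne.symm e34, Ne.symm e35, Ne.symm e36, Ne.symm e37, Ne.symm e38, Ne.symm e39]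
  have hS : pvIpaSpecial.get? b = none := by
    simp [PySem.Dict.get?, hIS, List.find?_eq_none, Ne.symm e1, Ne.symm e2, Ne.symm e3, Ne.symm e4, Ne.symm e5, Ne.symm e6, Ne.symm e7, Ne.symm e8, Ne.symm e9, Ne.symm e10, Ne.symm e11, Ne.symm e12, Ne.symm e13, Ne.symm e14, Ne.symm e15, Ne.symm e17, Ne.symm e19, Ne.symm e21, Ne.symm e22, Ne.symm e23, Ne.symm e28, Ne.symm e30, Ne.symm e32, Ne.symm e34, Ne.symm e37, Ne.symm e39]
  simp [PySem.Dict.getD, hF, hS]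

-- B's tuple membership is A's set membership (same 15 vowels)
theorem pvVowEq (b : String) : pvVowelTuple.contains b = PySem.Set.contains pvVowels b := by
  have hveq : pvVowels = pvVowelTuple := by decide
  rw [PySem.Set.contains, hveq]

-- int(phone[-1]) on a digit character is its code point minus 48
theorem pvDigitVal (c : Char) (h : PySem.Chars.isdigit c = true) :
    PySem.Int.ofChars? [c] = some ((c.toNat : Int) - 48) := by
  have hb : ('0' ≤ c ∧ c ≤ '9') := by simpa [PySem.Chars.isdigit] using h
  have hl : 48 ≤ c.toNat := hb.1
  have hu : c.toNat ≤ 57 := hb.2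
  have hc : Char.ofNat c.toNat = c := Char.ofNat_toNat c
  rw [← hc]
  set n := c.toNat with hn
  clear_value n
  interval_cases n <;> decide

-- B's per-phone function computes exactly A's per-phone pieces
theorem pvPhoneInfo_eq (p : String) :
    pvPhoneInfo p = (pvIpaOf (pvStripStress p).1,
                     PySem.Set.contains pvVowels (pvStripStress p).1,
                     (pvStripStress p).2) := by
  by_cases hp : p = ""
  · subst hp; decide
  · have hne : p.toList ≠ [] := by
      intro hl
      apply hp
      simpa using congrArg String.ofList hl
    have hgl : p.toList.getLast? = some (p.toList.getLast hne) := List.getLast?_eq_getLast hne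
    have hpg : PySem.List.pyGetD p.toList (-1) ' ' = p.toList.getLast hne :=
      PySem.List.pyGetD_neg_one p.toList ' ' hne
    simp only [pvPhoneInfo, pvStripStress, if_neg hp, hgl, hpg, PySem.List.slice_to_neg_one]
    by_cases hd : PySem.Chars.isdigit (p.toList.getLast hne) = true
    · simp only [if_pos hd, pvTableEq, pvVowEq, pvDigitVal _ hd]
    · simp only [if_neg hd, pvTableEq, pvVowEq]

-- the vowel-stress sublist (shared characterisation)
def pvVS (phones : List String) : List (Option Int) :=
  ((phones.map pvStripStress).filter (fun p => PySem.Set.contains pvVowels p.1)).map (·.2)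

theorem pvVS_cons (h : String) (t : List String) :
    pvVS (h :: t) =
      (if PySem.Set.contains pvVowels (pvStripStress h).1 then [(pvStripStress h).2] else []) ++ pvVS t := by
  simp only [pvVS, List.map_cons, List.filter_cons]
  split <;> simp

-- once primary_stress_index is set it never changes; counts just accumulate
theorem pvStepA_foldl_some (phones : List String) (parts : List String) (c i v : Int) :
    phones.foldl pvStepA (parts, c, i, some v) =
      (parts ++ phones.map (fun p => pvIpaOf (pvStripStress p).1),
       c + (pvVS phones).length, i + (pvVS phones).length, some v) := by
  induction phones generalizing parts c i with
  | nil => simp [pvVS]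
  | cons h t ih =>
    rw [List.foldl_cons]
    by_cases hv : PySem.Set.contains pvVowels (pvStripStress h).1
    · have hv' : (pvStripStress h).1 ∈ pvVowels := by simpa using hv
      have hstep : pvStepA (parts, c, i, some v) h =
          (parts ++ [pvIpaOf (pvStripStress h).1], c + 1, i + 1, some v) := by
        simp [pvStepA, hv']
      rw [hstep, ih, pvVS_cons]
      simp [hv']
      constructor <;> omega
    · have hv' : (pvStripStress h).1 ∉ pvVowels := by simpa using hv
      have hstep : pvStepA (parts, c, i, some v) h =
          (parts ++ [pvIpaOf (pvStripStress h).1], c, i, some v) := by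
        simp [pvStepA, hv']
      rw [hstep, ih, pvVS_cons]
      simp [hv']

-- loop invariant for A's fold, from an arbitrary state with primary still unset
theorem pvStepA_foldl_none (phones : List String) (parts : List String) (c i : Int) :
    phones.foldl pvStepA (parts, c, i, none) =
      (parts ++ phones.map (fun p => pvIpaOf (pvStripStress p).1),
       c + (pvVS phones).length, i + (pvVS phones).length,
       ((PySem.List.enumerate (pvVS phones) (i + 1)).find? (fun p => p.2 == some 1)).map (·.1)) := by
  induction phones generalizing parts c i with
  | nil => simp [pvVS]
  | cons h t ih =>
    rw [List.foldl_cons]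
    by_cases hv : PySem.Set.contains pvVowels (pvStripStress h).1
    · have hv' : (pvStripStress h).1 ∈ pvVowels := by simpa using hv
      by_cases hs : (pvStripStress h).2 = some 1
      · have hstep : pvStepA (parts, c, i, none) h =
            (parts ++ [pvIpaOf (pvStripStress h).1], c + 1, i + 1, some (i + 1)) := by
          simp [pvStepA, hv', hs]
        rw [hstep, pvStepA_foldl_some, pvVS_cons]
        simp [hv', PySem.List.enumerate_cons, hs]
        constructor <;> omega
      · have hstep : pvStepA (parts, c, i, none) h =
            (parts ++ [pvIpaOf (pvStripStress h).1], c + 1, i + 1, none) := by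
          simp [pvStepA, hv', hs]
        rw [hstep, ih, pvVS_cons]
        have hsb : ((pvStripStress h).2 == some 1) = false := by simp [hs]
        simp [hv', PySem.List.enumerate_cons, hsb]
        omega
    · have hv' : (pvStripStress h).1 ∉ pvVowels := by simpa using hv
      have hstep : pvStepA (parts, c, i, none) h =
          (parts ++ [pvIpaOf (pvStripStress h).1], c, i, none) := by
        simp [pvStepA, hv']
      rw [hstep, ih, pvVS_cons]
      simp [hv']

-- A's first-primary-stress scan over the enumerated vowel list IS list.index of 1
theorem pvFind_enum_eq_index? (vs : List (Option Int)) (s : Int) :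
    ((PySem.List.enumerate vs s).find? (fun p => p.2 == some 1)).map (·.1) =
      (PySem.List.index? vs (some 1)).map (fun k => s + (k : Int)) := by
  induction vs generalizing s with
  | nil => simp [PySem.List.enumerate_nil]
  | cons a t ih =>
    by_cases ha : a = some 1
    · subst ha
      rw [PySem.List.index?_cons_self]
      simp [PySem.List.enumerate_cons]
    · have hb : (a == some 1) = false := by simp [ha]
      rw [PySem.List.index?_cons_of_ne t ha]
      have hih := ih (s + 1)
      cases hI : PySem.List.index? t (some 1) with
      | none =>
        rw [hI] at hih
        rw [PySem.List.enumerate_cons, List.find?_cons_of_neg]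
        · rw [hih]; simp
        · simp [hb]
      | some k =>
        rw [hI] at hih
        rw [PySem.List.enumerate_cons, List.find?_cons_of_neg]
        · rw [hih]; simp; omega
        · simp [hb]

-- B's staged passes produce the shared characterisation
theorem pvAlt_char (phones : List String) :
    phones_to_ipa_py_alt phones =
      (PySem.Str.join " " (phones.map (fun p => pvIpaOf (pvStripStress p).1)),
       if pvVS phones = [] then 1 else ((pvVS phones).length : Int),
       if pvVS phones = [] then some 0
       else (PySem.List.index? (pvVS phones) (some 1)).map (fun k => (k : Int))) := by
  have hpe : pvPhoneInfo = (fun p => (pvIpaOf (pvStripStress p).1,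
      PySem.Set.contains pvVowels (pvStripStress p).1, (pvStripStress p).2)) :=
    funext pvPhoneInfo_eq
  have hvs : ((phones.map pvPhoneInfo).filter (·.2.1)).map (·.2.2) = pvVS phones := by
    rw [hpe, pvVS, List.filter_map, List.filter_map]
    simp [List.map_map, Function.comp_def]
  have hipa : (phones.map pvPhoneInfo).map (·.1) =
      phones.map (fun p => pvIpaOf (pvStripStress p).1) := by
    rw [hpe]
    simp [List.map_map, Function.comp_def]
  simp only [phones_to_ipa_py_alt, hvs, hipa]
  by_cases h0 : pvVS phones = []
  · simp [h0]
  · simp only [h0, if_neg h0]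
    by_cases hc : (pvVS phones).contains (some 1)
    · simp [hc]
      intro hmem
      exact absurd (by simpa using hc) hmem
    · have hI : PySem.List.index? (pvVS phones) (some 1) = none :=
        (PySem.List.index?_eq_none_iff _ _).mpr (by simpa using hc)
      have hI' : List.idxOf? (some 1) (pvVS phones) = none := by
        simpa [PySem.List.index?_eq_idxOf?] using hI
      simp [hc, hI']

-- ===== VERDICT (by name: the statement is the Claim_ definition above) =====
theorem phones_to_ipa_py_spec : Claim_equal_phones_to_ipa_py := by
  intro phones _
  unfold Spec_phones_to_ipa_py phones_to_ipa_py
  rw [pvStepA_foldl_none, pvAlt_char]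
  by_cases hvs : pvVS phones = []
  · simp [hvs, PySem.List.enumerate_nil]
  · rw [pvFind_enum_eq_index?]
    cases hI : PySem.List.index? (pvVS phones) (some 1) with
    | none => simp [hvs, hI]
    | some k =>
      simp [hvs, hI]
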